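-- pv_equiv track=rewrite | github.com/Prashanth13112002/closest_min_max | closest_minmax.py | closest_minmax
-- ===== SOURCE A (Python) =====
-- def closest_minmax(array):
--     minimum=float("inf")
--     maximum=float("-inf")
--     for i in array:
--         if(i<minimum):
--             minimum=i
--         if(i>maximum):
--             maximum=i
--     last_min_index=-1
--     last_max_index=-1
--     result=len(array)
--     for i in range(len(array)):
--         if array[i]==minimum:
--             last_min_index=i
--             if last_max_index>=0:
--                 result=min(result,i-last_max_index+1)
--         if array[i]==maximum:
--             last_max_index=i
--             if last_min_index>=0:
--                 result=min(result,i-last_min_index+1)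
--     return result
-- ===== SOURCE B (Python) =====
-- def closest_minmax(array):
--     if not array:
--         return 0
--     mn = min(array)
--     mx = max(array)
--     mins = [i for i, v in enumerate(array) if v == mn]
--     maxs = [i for i, v in enumerate(array) if v == mx]
--     best = abs(mins[0] - maxs[0])
--     p = 0
--     q = 0
--     while p < len(mins) and q < len(maxs):
--         d = abs(mins[p] - maxs[q])
--         if d < best:
--             best = d
--         if mins[p] < maxs[q]:
--             p += 1
--         else:
--             q += 1
--     return best + 1
-- ===== Notes on version B (the rewrite author's own statement) =====
-- stated objective: alternative
-- what changed: A is a single forward index scan keeping last-seen min/max indices and a running best window; B first computes min/max, collects the sorted lists of min-positions and max-positions, and two-pointer merges those two index lists to find the smallest |i-j|, returning it plus 1 (0 for the empty array).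
import Mathlib
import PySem

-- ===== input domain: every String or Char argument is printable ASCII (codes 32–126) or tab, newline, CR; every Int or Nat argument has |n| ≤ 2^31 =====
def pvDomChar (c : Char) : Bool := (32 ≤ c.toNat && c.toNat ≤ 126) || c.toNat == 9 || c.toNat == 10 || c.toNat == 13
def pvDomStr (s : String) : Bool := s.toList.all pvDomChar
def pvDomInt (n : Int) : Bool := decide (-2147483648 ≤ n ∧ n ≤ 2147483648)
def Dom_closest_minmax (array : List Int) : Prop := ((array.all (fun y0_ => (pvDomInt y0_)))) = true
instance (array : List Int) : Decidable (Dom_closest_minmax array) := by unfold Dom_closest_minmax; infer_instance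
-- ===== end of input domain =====

-- B replaces A's single stateful scan by: min/max, the two sorted position lists, and a two-pointer merge over them; same O(n) cost.

-- ===== PORT A =====
def closest_minmax (array : List Int) : Int :=
  let mm := array.foldl
    (fun (p : Option Int × Option Int) (i : Int) =>
      ((match p.1 with
        | none => some i
        | some m => if i < m then some i else some m),
       (match p.2 with
        | none => some i
        | some m => if i > m then some i else some m)))
    (none, none)
  let n : Int := (array.length : Int)
  let st := (PySem.List.pyRange 0 n 1).foldl
    (fun (s : Int × Int × Int) (i : Int) =>
      let ai := PySem.List.pyGetD array i 0
      let s1 :=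
        if some ai = mm.1 then
          (i, s.2.1, if s.2.1 ≥ 0 then min s.2.2 (i - s.2.1 + 1) else s.2.2)
        else s
      if some ai = mm.2 then
        (s1.1, i, if s1.1 ≥ 0 then min s1.2.2 (i - s1.1 + 1) else s1.2.2)
      else s1)
    (-1, -1, n)
  st.2.2

-- ===== PORT B =====
-- the while loop of Source B: two pointers p, q into the sorted position lists
def tpLoop (mins maxs : List Int) (p q : Nat) (best : Int) : Int :=
  if h : p < mins.length ∧ q < maxs.length then
    let d := |mins.getD p 0 - maxs.getD q 0|
    let best' := if d < best then d else best
    if mins.getD p 0 < maxs.getD q 0 then tpLoop mins maxs (p + 1) q best'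
    else tpLoop mins maxs p (q + 1) best'
  else best
termination_by mins.length - p + (maxs.length - q)
decreasing_by all_goals omega

def closest_minmax_alt (array : List Int) : Int :=
  if array = [] then 0
  else
    let mn := (PySem.List.min? array (fun x => x)).getD 0
    let mx := (PySem.List.max? array (fun x => x)).getD 0
    let mins := ((PySem.List.enumerate array).filter (fun p => p.2 == mn)).map (fun p => p.1)
    let maxs := ((PySem.List.enumerate array).filter (fun p => p.2 == mx)).map (fun p => p.1)
    let best := |mins.getD 0 0 - maxs.getD 0 0|
    tpLoop mins maxs 0 0 best + 1

-- ===== PRECONDITION & SPEC =====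
def Spec_closest_minmax (array : List Int) (out : Int) : Prop := out = closest_minmax_alt array
instance (array : List Int) (out : Int) : Decidable (Spec_closest_minmax array out) := by unfold Spec_closest_minmax; infer_instance

-- ===== CLAIM (what is proved, stated in full; the proofs are below) =====
def Claim_equal_closest_minmax : Prop := ∀ (array : List Int), Dom_closest_minmax array → Spec_closest_minmax array (closest_minmax array)

-- ===== LEMMAS AND PROOFS =====

-- `Occ l v k`: index k of l holds value v
def Occ (l : List Int) (v : Int) (k : Nat) : Prop := k < l.length ∧ l.getD k 0 = v

-- the common characterisation both ports are proved to satisfy on nonempty input: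
-- r = 1 + the smallest |i - j| over positions i of mn and j of mx
def BestVal (l : List Int) (mn mx : Int) (r : Int) : Prop :=
  (∀ i j : Nat, Occ l mn i → Occ l mx j → r ≤ |(i : Int) - (j : Int)| + 1) ∧
  (∃ i j : Nat, Occ l mn i ∧ Occ l mx j ∧ r = |(i : Int) - (j : Int)| + 1)

lemma bestVal_unique {l : List Int} {mn mx r1 r2 : Int}
    (h1 : BestVal l mn mx r1) (h2 : BestVal l mn mx r2) : r1 = r2 := by
  obtain ⟨lb1, i1, j1, o1, o1', e1⟩ := h1
  obtain ⟨lb2, i2, j2, o2, o2', e2⟩ := h2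
  have := lb1 i2 j2 o2 o2'
  have := lb2 i1 j1 o1 o1'
  omega

lemma occ_exists {l : List Int} {v : Int} (hv : v ∈ l) : ∃ i : Nat, Occ l v i := by
  obtain ⟨i, hi, he⟩ := List.mem_iff_getElem.mp hv
  exact ⟨i, hi, by rw [List.getD_eq_getElem l 0 hi]; exact he⟩

lemma abs_sub_of_le {i j : Nat} (h : j ≤ i) : |(i : Int) - (j : Int)| = (i : Int) - (j : Int) :=
  abs_of_nonneg (by omega)

lemma abs_sub_of_ge {i j : Nat} (h : i ≤ j) : |(i : Int) - (j : Int)| = (j : Int) - (i : Int) := by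
  rw [abs_sub_comm]
  exact abs_of_nonneg (by omega)

-- ---------- A side ----------

-- A's second loop, on Nat indices, with the computed min/max substituted
def stepA (l : List Int) (mn mx : Int) (s : Int × Int × Int) (k : Nat) : Int × Int × Int :=
  let ai := l.getD k 0
  let s1 :=
    if ai = mn then
      ((k : Int), s.2.1, if s.2.1 ≥ 0 then min s.2.2 ((k : Int) - s.2.1 + 1) else s.2.2)
    else s
  if ai = mx then (s1.1, (k : Int), if s1.1 ≥ 0 then min s1.2.2 ((k : Int) - s1.1 + 1) else s1.2.2)
  else s1

lemma foldMM_some (t : List Int) (m M : Int) :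
    t.foldl
      (fun (p : Option Int × Option Int) (i : Int) =>
        ((match p.1 with
          | none => some i
          | some m => if i < m then some i else some m),
         (match p.2 with
          | none => some i
          | some m => if i > m then some i else some m)))
      (some m, some M)
    = (some (t.foldl min m), some (t.foldl max M)) := by
  induction t generalizing m M with
  | nil => rfl
  | cons y ys ih =>
    simp only [List.foldl_cons]
    rw [show (if y < m then some y else some m) = some (min m y) by
          rcases lt_or_ge y m with h | h
          · rw [if_pos h, min_eq_right h.le]
          · rw [if_neg (not_lt.mpr h), min_eq_left h],
        show (if y > M then some y else some M) = some (max M y) by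
          rcases le_or_gt y M with h | h
          · rw [if_neg (not_lt.mpr h), max_eq_left h]
          · rw [if_pos h, max_eq_right h.le]]
    exact ih _ _

lemma closest_minmax_eq_foldA (x : Int) (t : List Int) :
    closest_minmax (x :: t)
    = ((List.range (x :: t).length).foldl
        (stepA (x :: t) (t.foldl min x) (t.foldl max x)) (-1, -1, ((x :: t).length : Int))).2.2 := by
  unfold closest_minmax
  rw [List.foldl_cons]
  simp only
  rw [foldMM_some]
  rw [show ((x :: t).length : Int) = ((x :: t).length : Nat) from rfl, PySem.List.pyRange_zero_nat,
    List.foldl_map]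
  refine congrArg (fun (z : Int × Int × Int) => z.2.2) ?_
  apply PySem.List.foldl_congr_mem
  intro s k hk
  simp only [List.mem_range] at hk
  simp only [stepA, PySem.List.pyGetD_natCast, Option.some.injEq]

-- `x` is the index of the last occurrence of v below k (or -1 if none)
def LastIdx (l : List Int) (v : Int) (k : Nat) (x : Int) : Prop :=
  (x = -1 ∧ ∀ i : Nat, i < k → l.getD i 0 ≠ v) ∨
  (∃ i : Nat, x = (i : Int) ∧ i < k ∧ l.getD i 0 = v ∧
    ∀ j : Nat, i < j → j < k → l.getD j 0 ≠ v)

-- r = min(len l, 1 + smallest |i-j| over min/max positions below k)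
def PartBest (l : List Int) (mn mx : Int) (k : Nat) (r : Int) : Prop :=
  r ≤ (l.length : Int) ∧
  (∀ i j : Nat, i < k → j < k → l.getD i 0 = mn → l.getD j 0 = mx →
    r ≤ |(i : Int) - (j : Int)| + 1) ∧
  (r = (l.length : Int) ∨ ∃ i j : Nat, i < k ∧ j < k ∧ l.getD i 0 = mn ∧ l.getD j 0 = mx ∧
    r = |(i : Int) - (j : Int)| + 1)

lemma lastIdx_extend {l : List Int} {v : Int} {k : Nat} {x : Int}
    (hne : l.getD k 0 ≠ v) (h : LastIdx l v k x) : LastIdx l v (k + 1) x := by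
  rcases h with ⟨h1, h2⟩ | ⟨i, e, hik, hv, hno⟩
  · left
    refine ⟨h1, fun i hi => ?_⟩
    rcases Nat.lt_succ_iff_lt_or_eq.mp hi with h | h
    · exact h2 i h
    · subst h; exact hne
  · right
    refine ⟨i, e, by omega, hv, fun j hj1 hj2 => ?_⟩
    rcases Nat.lt_succ_iff_lt_or_eq.mp hj2 with h | h
    · exact hno j hj1 h
    · subst h; exact hne

lemma lastIdx_set {l : List Int} {v : Int} {k : Nat}
    (hv : l.getD k 0 = v) : LastIdx l v (k + 1) (k : Int) :=
  Or.inr ⟨k, rfl, Nat.lt_succ_self k, hv, fun j h1 h2 => by omega⟩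

-- the last occurrence bounds every occurrence
lemma lastIdx_ge {l : List Int} {v : Int} {k : Nat} {x : Int}
    (h : LastIdx l v k x) {j : Nat} (hj : j < k) (hv : l.getD j 0 = v) : (j : Int) ≤ x := by
  rcases h with ⟨h1, h2⟩ | ⟨i, e, hik, hiv, hno⟩
  · exact absurd hv (h2 j hj)
  · subst e
    by_contra hc
    have hij : i < j := by omega
    exact hno j hij hj hv

-- update of the running best when index k holds the value mn and lM is the last max index
lemma partBest_min_update {l : List Int} {mn mx : Int} {k : Nat} {lM r : Int}
    (hk : k < l.length)
    (hmn : l.getD k 0 = mn)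
    (h2 : LastIdx l mx k lM) (h3 : PartBest l mn mx k r)
    (hcov : l.getD k 0 ≠ mx) :
    PartBest l mn mx (k + 1) (if lM ≥ 0 then min r ((k : Int) - lM + 1) else r) := by
  obtain ⟨hr1, hr2, hr3⟩ := h3
  have hkl : (k : Int) < (l.length : Int) := by exact_mod_cast hk
  split_ifs with hlM
  · rcases h2 with ⟨he, _⟩ | ⟨i0, he, hi0k, hi0v, hno⟩
    · omega
    · have hi0kZ : (i0 : Int) < (k : Int) := by exact_mod_cast hi0k
      refine ⟨by rw [he] at hlM ⊢; omega, ?_, ?_⟩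
      · intro i j hi hj hiv hjv
        rcases Nat.lt_succ_iff_lt_or_eq.mp hi with hi' | hi'
        · rcases Nat.lt_succ_iff_lt_or_eq.mp hj with hj' | hj'
          · have := hr2 i j hi' hj' hiv hjv
            omega
          · subst hj'
            exact absurd hjv hcov
        · subst hi'
          rcases Nat.lt_succ_iff_lt_or_eq.mp hj with hj' | hj'
          · have hji0 : (j : Int) ≤ lM :=
              lastIdx_ge (Or.inr ⟨i0, he, hi0k, hi0v, hno⟩) hj' hjv
            rw [abs_sub_of_le (by rw [he] at hji0; omega)]
            omega
          · subst hj'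
            exact absurd hjv hcov
      · rcases le_or_gt r ((k : Int) - lM + 1) with hle | hltr
        · rw [min_eq_left hle]
          rcases hr3 with h | ⟨i, j, hi, hj, hiv, hjv, he'⟩
          · exact Or.inl h
          · exact Or.inr ⟨i, j, by omega, by omega, hiv, hjv, he'⟩
        · right
          refine ⟨k, i0, Nat.lt_succ_self k, by omega, hmn, hi0v, ?_⟩
          rw [min_eq_right hltr.le, abs_sub_of_le (by omega), he]
  · rcases h2 with ⟨he, hnone⟩ | ⟨i0, he, hi0k, hi0v, hno⟩
    · refine ⟨hr1, ?_, ?_⟩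
      · intro i j hi hj hiv hjv
        rcases Nat.lt_succ_iff_lt_or_eq.mp hj with hj' | hj'
        · exact absurd hjv (hnone j hj')
        · subst hj'
          exact absurd hjv hcov
      · rcases hr3 with h | ⟨i, j, hi, hj, hiv, hjv, he'⟩
        · exact Or.inl h
        · exact Or.inr ⟨i, j, by omega, by omega, hiv, hjv, he'⟩
    · exfalso
      rw [he] at hlM
      omega

lemma partBest_swap {l : List Int} {mn mx : Int} {k : Nat} {r : Int}
    (h : PartBest l mn mx k r) : PartBest l mx mn k r := by
  obtain ⟨h1, h2, h3⟩ := h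
  refine ⟨h1, fun i j hi hj hiv hjv => ?_, ?_⟩
  · rw [abs_sub_comm]
    exact h2 j i hj hi hjv hiv
  · rcases h3 with h | ⟨i, j, hi, hj, hiv, hjv, he⟩
    · exact Or.inl h
    · exact Or.inr ⟨j, i, hj, hi, hjv, hiv, by rw [abs_sub_comm] at he; exact he⟩

lemma partBest_extend {l : List Int} {mn mx : Int} {k : Nat} {r : Int}
    (hmn : l.getD k 0 ≠ mn) (hmx : l.getD k 0 ≠ mx) (h : PartBest l mn mx k r) :
    PartBest l mn mx (k + 1) r := by
  obtain ⟨h1, h2, h3⟩ := h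
  refine ⟨h1, ?_, ?_⟩
  · intro i j hi hj hiv hjv
    rcases Nat.lt_succ_iff_lt_or_eq.mp hi with hi' | hi'
    · rcases Nat.lt_succ_iff_lt_or_eq.mp hj with hj' | hj'
      · exact h2 i j hi' hj' hiv hjv
      · subst hj'; exact absurd hjv hmx
    · subst hi'; exact absurd hiv hmn
  · rcases h3 with h | ⟨i, j, hi, hj, hiv, hjv, he⟩
    · exact Or.inl h
    · exact Or.inr ⟨i, j, by omega, by omega, hiv, hjv, he⟩

lemma partBest_both_update {l : List Int} {mn mx : Int} {k : Nat} {lM r : Int}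
    (hk : k < l.length)
    (hmn : l.getD k 0 = mn) (hmx : l.getD k 0 = mx)
    (h2 : LastIdx l mx k lM) (h3 : PartBest l mn mx k r) :
    PartBest l mn mx (k + 1)
      (min (if lM ≥ 0 then min r ((k : Int) - lM + 1) else r) ((k : Int) - (k : Int) + 1)) := by
  obtain ⟨hr1, hr2, hr3⟩ := h3
  have hkl : (k : Int) < (l.length : Int) := by exact_mod_cast hk
  set r1 := if lM ≥ 0 then min r ((k : Int) - lM + 1) else r with hr1def
  have hr1r : r1 ≤ r := by
    rw [hr1def]; split_ifs <;> omega
  refine ⟨by omega, ?_, ?_⟩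
  · intro i j hi hj hiv hjv
    rcases Nat.lt_succ_iff_lt_or_eq.mp hj with hj' | hj'
    · rcases Nat.lt_succ_iff_lt_or_eq.mp hi with hi' | hi'
      · have := hr2 i j hi' hj' hiv hjv
        omega
      · subst hi'
        rcases h2 with ⟨he, hnone⟩ | ⟨i0, he, hi0k, hi0v, hno⟩
        · exact absurd hjv (hnone j hj')
        · have hji0 : (j : Int) ≤ lM :=
            lastIdx_ge (Or.inr ⟨i0, he, hi0k, hi0v, hno⟩) hj' hjv
          rw [abs_sub_of_le (by rw [he] at hji0; omega)]
          have hge0 : lM ≥ 0 := by rw [he]; omega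
          rw [hr1def] at hr1r ⊢
          rw [if_pos hge0]
          omega
    · subst hj'
      have habs := abs_nonneg ((i : Int) - (j : Int))
      omega
  · rcases le_or_gt r1 ((k : Int) - (k : Int) + 1) with hle | hgt
    · rw [min_eq_left hle]
      rw [hr1def]
      split_ifs with hlM
      · rcases h2 with ⟨he, _⟩ | ⟨i0, he, hi0k, hi0v, hno⟩
        · omega
        · rcases le_or_gt r ((k : Int) - lM + 1) with hle' | hgt'
          · rw [min_eq_left hle']
            rcases hr3 with h | ⟨i, j, hi, hj, hiv, hjv, he'⟩
            · exact Or.inl h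
            · exact Or.inr ⟨i, j, by omega, by omega, hiv, hjv, he'⟩
          · right
            refine ⟨k, i0, Nat.lt_succ_self k, by omega, hmn, hi0v, ?_⟩
            rw [min_eq_right hgt'.le, abs_sub_of_le (by omega), he]
      · rcases hr3 with h | ⟨i, j, hi, hj, hiv, hjv, he'⟩
        · exact Or.inl h
        · exact Or.inr ⟨i, j, by omega, by omega, hiv, hjv, he'⟩
    · right
      refine ⟨k, k, Nat.lt_succ_self k, Nat.lt_succ_self k, hmn, hmx, ?_⟩
      rw [min_eq_right hgt.le]
      simp

lemma stepA_inv (l : List Int) (mn mx : Int) (k : Nat) (s : Int × Int × Int)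
    (hk : k < l.length)
    (h1 : LastIdx l mn k s.1) (h2 : LastIdx l mx k s.2.1) (h3 : PartBest l mn mx k s.2.2) :
    LastIdx l mn (k + 1) (stepA l mn mx s k).1 ∧
    LastIdx l mx (k + 1) (stepA l mn mx s k).2.1 ∧
    PartBest l mn mx (k + 1) (stepA l mn mx s k).2.2 := by
  obtain ⟨lm, lM, r⟩ := s
  simp only at h1 h2 h3
  by_cases hmn : l.getD k 0 = mn <;> by_cases hmx : l.getD k 0 = mx
  · -- index k holds both values, so mn = mx
    have hmm : mn = mx := hmn.symm.trans hmx
    subst hmm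
    have hge : ((k : Int) ≥ 0) := by positivity
    simp only [stepA, hmn, if_true]
    rw [if_pos hge]
    exact ⟨lastIdx_set hmn, lastIdx_set hmn, partBest_both_update hk hmn hmn h2 h3⟩
  · -- index k holds mn only
    have hne : ¬(mn = mx) := fun h => hmx (hmn.trans h)
    simp only [stepA, hmn, if_true, if_neg hne]
    exact ⟨lastIdx_set hmn, lastIdx_extend hmx h2, partBest_min_update hk hmn h2 h3 hmx⟩
  · -- index k holds mx only
    have hne2 : ¬(mx = mn) := fun h => hmn (hmx.trans h)
    simp only [stepA, hmx, if_true, if_neg hne2]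
    exact ⟨lastIdx_extend hmn h1, lastIdx_set hmx,
      partBest_swap (partBest_min_update hk hmx h1 (partBest_swap h3) hmn)⟩
  · -- index k holds neither value
    simp only [stepA, if_neg hmn, if_neg hmx]
    exact ⟨lastIdx_extend hmn h1, lastIdx_extend hmx h2, partBest_extend hmn hmx h3⟩

lemma foldA_inv (l : List Int) (mn mx : Int) (k : Nat) (hk : k ≤ l.length) :
    LastIdx l mn k ((List.range k).foldl (stepA l mn mx) (-1, -1, (l.length : Int))).1 ∧
    LastIdx l mx k ((List.range k).foldl (stepA l mn mx) (-1, -1, (l.length : Int))).2.1 ∧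
    PartBest l mn mx k ((List.range k).foldl (stepA l mn mx) (-1, -1, (l.length : Int))).2.2 := by
  induction k with
  | zero =>
    refine ⟨Or.inl ⟨rfl, by omega⟩, Or.inl ⟨rfl, by omega⟩, le_refl _, by omega, Or.inl rfl⟩
  | succ k ih =>
    obtain ⟨h1, h2, h3⟩ := ih (by omega)
    rw [List.range_succ, List.foldl_append, List.foldl_cons, List.foldl_nil]
    exact stepA_inv l mn mx k _ (by omega) h1 h2 h3

lemma A_best (x : Int) (t : List Int) :
    BestVal (x :: t) (t.foldl min x) (t.foldl max x) (closest_minmax (x :: t)) := by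
  have hmnl : t.foldl min x ∈ x :: t := by
    rcases PySem.List.foldl_min_mem t x with h | h
    · rw [h]; exact List.mem_cons_self
    · exact List.mem_cons_of_mem x h
  have hmxl : t.foldl max x ∈ x :: t := by
    rcases PySem.List.foldl_max_mem t x with h | h
    · rw [h]; exact List.mem_cons_self
    · exact List.mem_cons_of_mem x h
  obtain ⟨i0, hi0⟩ := occ_exists hmnl
  obtain ⟨j0, hj0⟩ := occ_exists hmxl
  rw [closest_minmax_eq_foldA]
  obtain ⟨-, -, hlen, hlb, hach⟩ :=
    foldA_inv (x :: t) (t.foldl min x) (t.foldl max x) (x :: t).length (le_refl _)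
  constructor
  · intro i j oi oj
    exact hlb i j oi.1 oj.1 oi.2 oj.2
  · rcases hach with hlen' | ⟨i, j, hi, hj, hiv, hjv, he⟩
    · refine ⟨i0, j0, hi0, hj0, ?_⟩
      have h1 := hlb i0 j0 hi0.1 hj0.1 hi0.2 hj0.2
      have hb : |(i0 : Int) - (j0 : Int)| + 1 ≤ ((x :: t).length : Int) := by
        have hi' : (i0 : Int) < ((x :: t).length : Int) := by exact_mod_cast hi0.1
        have hj' : (j0 : Int) < ((x :: t).length : Int) := by exact_mod_cast hj0.1
        rcases le_total i0 j0 with h | h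
        · rw [abs_sub_of_ge h]; omega
        · rw [abs_sub_of_le h]; omega
      omega
    · exact ⟨i, j, ⟨hi, hiv⟩, ⟨hj, hjv⟩, he⟩

-- ---------- B side ----------

lemma enumerate_eq_map_range (l : List Int) (s : Int) :
    PySem.List.enumerate l s = (List.range l.length).map (fun (k : Nat) => (s + (k : Int), l.getD k 0)) := by
  induction l generalizing s with
  | nil => simp [PySem.List.enumerate_nil]
  | cons y ys ih =>
    rw [PySem.List.enumerate_cons, ih]
    simp [List.range_succ_eq_map, Function.comp_def]
    intro a _
    ring

lemma mins_eq (l : List Int) (v : Int) :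
    ((PySem.List.enumerate l).filter (fun p => p.2 == v)).map (fun p => p.1)
    = ((List.range l.length).filter (fun k => l.getD k 0 == v)).map (fun (k : Nat) => (k : Int)) := by
  rw [enumerate_eq_map_range, List.filter_map, List.map_map]
  simp [Function.comp_def]

lemma mem_mins (l : List Int) (v : Int) (x : Int) :
    x ∈ ((PySem.List.enumerate l).filter (fun p => p.2 == v)).map (fun p => p.1)
    ↔ ∃ k : Nat, x = (k : Int) ∧ Occ l v k := by
  rw [mins_eq]
  simp only [List.mem_map, List.mem_filter, List.mem_range, beq_iff_eq, Occ]
  constructor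
  · rintro ⟨k, ⟨hk, hv⟩, he⟩
    exact ⟨k, he.symm, hk, hv⟩
  · rintro ⟨k, he, hk, hv⟩
    exact ⟨k, ⟨hk, hv⟩, he.symm⟩

lemma mins_sorted (l : List Int) (v : Int) :
    (((PySem.List.enumerate l).filter (fun p => p.2 == v)).map (fun p => p.1)).Pairwise (· < ·) := by
  rw [mins_eq, List.pairwise_map]
  have h : (List.filter (fun k => l.getD k 0 == v) (List.range l.length)).Pairwise (· < ·) :=
    List.Pairwise.filter _ List.pairwise_lt_range
  exact h.imp (by intro a b hab; exact_mod_cast hab)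

lemma mem_split (xs : List Int) (hx : xs.Pairwise (· < ·)) (q : Nat) (hq : q < xs.length) :
    ∀ j ∈ xs, j ∈ xs.take q ∨ xs[q] ≤ j := by
  intro j hj
  obtain ⟨r, hr, he⟩ := List.mem_iff_getElem.mp hj
  rcases lt_or_ge r q with h | h
  · left
    rw [← he]
    have : xs[r] = (xs.take q)[r]'(by simp; omega) := (List.getElem_take).symm
    rw [this]
    exact List.getElem_mem _
  · right
    rcases eq_or_lt_of_le h with h' | h'
    · subst h'; omega
    · have := (List.pairwise_iff_getElem.mp hx) q r hq hr h'
      omega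

lemma take_succ_mem (xs : List Int) (p : Nat) (hp : p < xs.length) (x : Int) :
    x ∈ xs.take (p + 1) ↔ x ∈ xs.take p ∨ x = xs[p] := by
  rw [List.take_add_one, List.getElem?_eq_getElem hp]
  simp only [Option.toList_some, List.mem_append, List.mem_singleton]

lemma tpLoop_spec (mins maxs : List Int) (p q : Nat) (best : Int)
    (hm : mins.Pairwise (· < ·)) (hM : maxs.Pairwise (· < ·))
    (hub : ∀ i ∈ mins, ∀ j ∈ maxs, (i ∈ mins.take p ∨ j ∈ maxs.take q) → best ≤ |i - j|)
    (hach : ∃ i ∈ mins, ∃ j ∈ maxs, best = |i - j|) :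
    (∀ i ∈ mins, ∀ j ∈ maxs, tpLoop mins maxs p q best ≤ |i - j|) ∧
    (∃ i ∈ mins, ∃ j ∈ maxs, tpLoop mins maxs p q best = |i - j|) := by
  induction p, q, best using tpLoop.induct mins maxs with
  | case1 p q best h d best' hlt ih =>
    rw [tpLoop, dif_pos h, if_pos hlt]
    have hp := h.1
    have hq := h.2
    have hma : mins.getD p 0 = mins[p] := List.getD_eq_getElem mins 0 hp
    have hMb : maxs.getD q 0 = maxs[q] := List.getD_eq_getElem maxs 0 hq
    have hbb : best' ≤ best := by
      show (if d < best then d else best) ≤ best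
      split_ifs with hd
      · exact hd.le
      · exact le_rfl
    have hach' : ∃ i ∈ mins, ∃ j ∈ maxs, best' = |i - j| := by
      show ∃ i ∈ mins, ∃ j ∈ maxs, (if d < best then d else best) = |i - j|
      split_ifs with hd
      · exact ⟨mins[p], List.getElem_mem hp, maxs[q], List.getElem_mem hq, by
          show d = _; simp only [d, hma, hMb]⟩
      · exact hach
    have hbd : best' ≤ d := by
      show (if d < best then d else best) ≤ d
      split_ifs with hd
      · exact le_rfl
      · exact le_of_not_gt hd
    have hub' : ∀ i ∈ mins, ∀ j ∈ maxs, (i ∈ mins.take (p + 1) ∨ j ∈ maxs.take q) → best' ≤ |i - j| := by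
      intro i hi j hj hc
      rcases hc with hc | hc
      · rcases (take_succ_mem mins p hp i).mp hc with hc' | hc'
        · exact le_trans hbb (hub i hi j hj (Or.inl hc'))
        · rcases mem_split maxs hM q hq j hj with hjc | hjc
          · exact le_trans hbb (hub i hi j hj (Or.inr hjc))
          · have hd : d = maxs[q] - mins[p] := by
              show |mins.getD p 0 - maxs.getD q 0| = _
              rw [hma, hMb, abs_of_neg (by rw [hma, hMb] at hlt; omega)]
              ring
            have habs : i - j ≤ 0 := by rw [hma, hMb] at hlt; omega
            rw [abs_of_nonpos habs]
            rw [hma, hMb] at hlt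
            subst hc'
            omega
      · exact le_trans hbb (hub i hi j hj (Or.inr hc))
    exact ih hub' hach'
  | case2 p q best h d best' hlt ih =>
    rw [tpLoop, dif_pos h, if_neg hlt]
    have hp := h.1
    have hq := h.2
    have hma : mins.getD p 0 = mins[p] := List.getD_eq_getElem mins 0 hp
    have hMb : maxs.getD q 0 = maxs[q] := List.getD_eq_getElem maxs 0 hq
    have hge : maxs.getD q 0 ≤ mins.getD p 0 := le_of_not_gt hlt
    have hbb : best' ≤ best := by
      show (if d < best then d else best) ≤ best
      split_ifs with hd
      · exact hd.le
      · exact le_rfl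
    have hach' : ∃ i ∈ mins, ∃ j ∈ maxs, best' = |i - j| := by
      show ∃ i ∈ mins, ∃ j ∈ maxs, (if d < best then d else best) = |i - j|
      split_ifs with hd
      · exact ⟨mins[p], List.getElem_mem hp, maxs[q], List.getElem_mem hq, by
          show d = _; simp only [d, hma, hMb]⟩
      · exact hach
    have hbd : best' ≤ d := by
      show (if d < best then d else best) ≤ d
      split_ifs with hd
      · exact le_rfl
      · exact le_of_not_gt hd
    have hub' : ∀ i ∈ mins, ∀ j ∈ maxs, (i ∈ mins.take p ∨ j ∈ maxs.take (q + 1)) → best' ≤ |i - j| := by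
      intro i hi j hj hc
      rcases hc with hc | hc
      · exact le_trans hbb (hub i hi j hj (Or.inl hc))
      · rcases (take_succ_mem maxs q hq j).mp hc with hc' | hc'
        · exact le_trans hbb (hub i hi j hj (Or.inr hc'))
        · rcases mem_split mins hm p hp i hi with hic | hic
          · exact le_trans hbb (hub i hi j hj (Or.inl hic))
          · have hd : d = mins[p] - maxs[q] := by
              show |mins.getD p 0 - maxs.getD q 0| = _
              rw [hma, hMb, abs_of_nonneg (by rw [hma, hMb] at hge; omega)]
            have habs : 0 ≤ i - j := by rw [hma, hMb] at hge; omega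
            rw [abs_of_nonneg habs]
            rw [hma, hMb] at hge
            subst hc'
            omega
    exact ih hub' hach'
  | case3 p q best h =>
    rw [tpLoop, dif_neg h]
    refine ⟨fun i hi j hj => hub i hi j hj ?_, hach⟩
    rcases Nat.lt_or_ge p mins.length with hp | hp
    · right
      rw [List.take_of_length_le (by omega)]
      exact hj
    · left
      rw [List.take_of_length_le (by omega)]
      exact hi

lemma B_best (x : Int) (t : List Int) :
    BestVal (x :: t) (t.foldl min x) (t.foldl max x) (closest_minmax_alt (x :: t)) := by
  have hne : (x :: t) ≠ [] := by simp
  have hmnl : t.foldl min x ∈ x :: t := by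
    rcases PySem.List.foldl_min_mem t x with h | h
    · rw [h]; exact List.mem_cons_self
    · exact List.mem_cons_of_mem x h
  have hmxl : t.foldl max x ∈ x :: t := by
    rcases PySem.List.foldl_max_mem t x with h | h
    · rw [h]; exact List.mem_cons_self
    · exact List.mem_cons_of_mem x h
  obtain ⟨i0, hi0⟩ := occ_exists hmnl
  obtain ⟨j0, hj0⟩ := occ_exists hmxl
  unfold closest_minmax_alt
  rw [if_neg hne]
  simp only [PySem.List.min?_id_cons, PySem.List.max?_id_cons, Option.getD_some]
  set mins := ((PySem.List.enumerate (x :: t)).filter (fun p => p.2 == t.foldl min x)).map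
    (fun p => p.1) with hminsdef
  set maxs := ((PySem.List.enumerate (x :: t)).filter (fun p => p.2 == t.foldl max x)).map
    (fun p => p.1) with hmaxsdef
  have hminsne : mins ≠ [] := by
    have : (i0 : Int) ∈ mins := (mem_mins _ _ _).mpr ⟨i0, rfl, hi0⟩
    intro hc
    rw [hc] at this
    exact List.not_mem_nil this
  have hmaxsne : maxs ≠ [] := by
    have : (j0 : Int) ∈ maxs := (mem_mins _ _ _).mpr ⟨j0, rfl, hj0⟩
    intro hc
    rw [hc] at this
    exact List.not_mem_nil this
  have hpm : 0 < mins.length := List.length_pos_of_ne_nil hminsne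
  have hpM : 0 < maxs.length := List.length_pos_of_ne_nil hmaxsne
  have hg0 : mins.getD 0 0 = mins[0] := List.getD_eq_getElem mins 0 hpm
  have hg0' : maxs.getD 0 0 = maxs[0] := List.getD_eq_getElem maxs 0 hpM
  obtain ⟨hlb, hach⟩ :=
    tpLoop_spec mins maxs 0 0 (|mins.getD 0 0 - maxs.getD 0 0|)
      (mins_sorted _ _) (mins_sorted _ _)
      (by intro i _ j _ hc; rcases hc with hc | hc <;> simp at hc)
      ⟨mins[0], List.getElem_mem hpm, maxs[0], List.getElem_mem hpM, by rw [hg0, hg0']⟩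
  constructor
  · intro i j oi oj
    have hi : (i : Int) ∈ mins := (mem_mins _ _ _).mpr ⟨i, rfl, oi⟩
    have hj : (j : Int) ∈ maxs := (mem_mins _ _ _).mpr ⟨j, rfl, oj⟩
    have := hlb _ hi _ hj
    omega
  · obtain ⟨i, hi, j, hj, he⟩ := hach
    obtain ⟨ki, hki, oki⟩ := (mem_mins _ _ _).mp hi
    obtain ⟨kj, hkj, okj⟩ := (mem_mins _ _ _).mp hj
    refine ⟨ki, kj, oki, okj, ?_⟩
    rw [he, hki, hkj]

-- ===== VERDICT (by name: the statement is the Claim_ definition above) =====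
theorem closest_minmax_spec : Claim_equal_closest_minmax := by
  intro array _
  unfold Spec_closest_minmax
  cases array with
  | nil => decide
  | cons x t => exact bestVal_unique (A_best x t) (B_best x t)
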